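-- pv_equiv track=rewrite | github.com/tienNT123hx/BTL-LTTT | app1.py | lz_encode
-- ===== SOURCE A (Python) =====
-- def lz_encode(data):
--     dictionary = {}
--     current_string = ""
--     encoded_data = []
--     dict_size = 1
--
--     for char in data:
--         current_string += char
--         if current_string not in dictionary:
--             dictionary[current_string] = dict_size
--             dict_size += 1
--             if len(current_string) == 1:
--                 encoded_data.append((0, 0, char))
--             else:
--                 encoded_data.append((dictionary[current_string[:-1]], len(current_string) - 1, char))
--             current_string = ""
--     return encoded_data
-- ===== SOURCE B (Python) =====
-- def lz_encode(data):
--     # Trie of phrases via a (node_id, char) -> node_id map; root = 0.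
--     # Avoids rebuilding and hashing the growing phrase strings altogether.
--     children = {}
--     encoded_data = []
--     cur = 0          # trie node of the phrase matched so far ("" -> 0)
--     depth = 0        # its length
--     next_id = 1
--     for char in data:
--         key = (cur, char)
--         node = children.get(key)
--         if node is not None:
--             cur = node
--             depth += 1
--         else:
--             children[key] = next_id
--             next_id += 1
--             encoded_data.append((cur, depth, char))
--             cur = 0
--             depth = 0
--     return encoded_data
-- ===== Notes on version B (the rewrite author's own statement) =====
-- stated objective: alternative
-- what changed: Replaces the dict keyed by growing phrase strings (membership test hashes a phrase string rebuilt by concatenation) with an LZ78 trie encoded as a (node_id, char) -> node_id map, advancing one character at a time; the special case for length-1 phrases disappears because the trie root is node 0.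
import Mathlib
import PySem

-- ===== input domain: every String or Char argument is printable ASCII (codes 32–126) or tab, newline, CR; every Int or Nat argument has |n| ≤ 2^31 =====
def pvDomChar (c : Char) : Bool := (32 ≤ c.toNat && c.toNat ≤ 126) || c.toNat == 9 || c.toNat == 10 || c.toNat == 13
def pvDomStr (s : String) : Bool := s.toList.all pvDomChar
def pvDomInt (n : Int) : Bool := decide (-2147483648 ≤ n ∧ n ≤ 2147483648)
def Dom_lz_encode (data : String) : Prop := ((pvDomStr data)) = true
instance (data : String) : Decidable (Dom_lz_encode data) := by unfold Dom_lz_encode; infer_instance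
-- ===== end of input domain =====

-- B replaces A's dict keyed by growing phrase strings with an LZ78 trie stored as a
-- (node_id, char) -> node_id map, advancing one character at a time (objective: alternative algorithm).

-- ===== PORT A =====
-- state: (dictionary, current_string, encoded_data, dict_size); current_string as List Char
def lzA_step (st : PySem.Dict (List Char) Int × List Char × List (Int × Int × String) × Int)
    (c : Char) : PySem.Dict (List Char) Int × List Char × List (Int × Int × String) × Int :=
  match st with
  | (d, cs0, out, size) =>
    let cs := cs0 ++ [c]                      -- current_string += char
    if d.contains cs then (d, cs, out, size)  -- 'not in' test, branches in Python's order
    else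
      let d' := d.insert cs size
      -- current_string[:-1] is dropLast (exact: cs is nonempty here and [:-1] drops the last char)
      let out' := out ++ [if cs.length = 1 then ((0 : Int), (0 : Int), String.ofList [c])
                          else (d'.getD cs.dropLast 0, (cs.length : Int) - 1, String.ofList [c])]
      (d', [], out', size + 1)

def lz_encode (data : String) : List (Int × Int × String) :=
  (data.toList.foldl lzA_step (PySem.Dict.empty, [], [], 1)).2.2.1

-- ===== PORT B =====
-- state: (children, cur, depth, encoded_data, next_id)
def lzB_step (st : PySem.Dict (Int × Char) Int × Int × Int × List (Int × Int × String) × Int)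
    (c : Char) : PySem.Dict (Int × Char) Int × Int × Int × List (Int × Int × String) × Int :=
  match st with
  | (ch, cur, depth, out, nid) =>
    match ch.get? (cur, c) with               -- children.get(key)
    | some node => (ch, node, depth + 1, out, nid)
    | none => (ch.insert (cur, c) nid, 0, 0, out ++ [(cur, depth, String.ofList [c])], nid + 1)

def lz_encode_alt (data : String) : List (Int × Int × String) :=
  (data.toList.foldl lzB_step (PySem.Dict.empty, 0, 0, [], 1)).2.2.2.1

-- ===== PRECONDITION & SPEC =====
def Spec_lz_encode (data : String) (out : List (Int × Int × String)) : Prop := out = lz_encode_alt data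
instance (data : String) (out : List (Int × Int × String)) : Decidable (Spec_lz_encode data out) := by unfold Spec_lz_encode; infer_instance

-- ===== CLAIM (what is proved, stated in full; the proofs are below) =====
def Claim_equal_lz_encode : Prop := ∀ (data : String), Dom_lz_encode data → Spec_lz_encode data (lz_encode data)

-- ===== LEMMAS AND PROOFS =====

-- id of a phrase: 0 for the empty phrase (trie root), else its dictionary value
def idOf (d : PySem.Dict (List Char) Int) (s : List Char) : Int :=
  if s = [] then 0 else d.getD s 0

-- the bisimulation invariant between A's state and B's state
def lzInv (d : PySem.Dict (List Char) Int) (cs : List Char) (size : Int)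
    (ch : PySem.Dict (Int × Char) Int) (cur depth nid : Int) : Prop :=
  nid = size ∧ 1 ≤ size ∧ depth = (cs.length : Int) ∧ cur = idOf d cs ∧
  (cs = [] ∨ (d.get? cs).isSome) ∧
  (∀ s v, d.get? s = some v → 1 ≤ v ∧ v < size ∧ s ≠ []) ∧
  (∀ s t vs vt, d.get? s = some vs → d.get? t = some vt → vs = vt → s = t) ∧
  (∀ s c, (d.get? (s ++ [c])).isSome → s = [] ∨ (d.get? s).isSome) ∧
  (∀ p c v, ch.get? (p, c) = some v → 0 ≤ p ∧ p < size) ∧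
  (∀ s c, (s = [] ∨ (d.get? s).isSome) → ch.get? (idOf d s, c) = d.get? (s ++ [c]))

def lzRel (a : PySem.Dict (List Char) Int × List Char × List (Int × Int × String) × Int)
    (b : PySem.Dict (Int × Char) Int × Int × Int × List (Int × Int × String) × Int) : Prop :=
  lzInv a.1 a.2.1 a.2.2.2 b.1 b.2.1 b.2.2.1 b.2.2.2.2 ∧ a.2.2.1 = b.2.2.2.1

lemma concat_inj_chars {s t : List Char} {c c' : Char} (h : s ++ [c] = t ++ [c']) :
    s = t ∧ c = c' := by
  have h2 := List.append_inj' h rfl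
  exact ⟨h2.1, by simpa using h2.2⟩

lemma idOf_lt {d : PySem.Dict (List Char) Int} {size : Int} (h1 : 1 ≤ size)
    (hr : ∀ s v, d.get? s = some v → 1 ≤ v ∧ v < size ∧ s ≠ []) (s : List Char) :
    0 ≤ idOf d s ∧ (s = [] ∨ (d.get? s).isSome → idOf d s < size) := by
  unfold idOf
  split_ifs with hs
  · exact ⟨le_refl 0, fun _ => by omega⟩
  · rw [PySem.Dict.getD_eq_get?_getD]
    cases hv : d.get? s with
    | none => simp [hs]
    | some v => have := hr s v hv; simp; omega

lemma idOf_inj {d : PySem.Dict (List Char) Int} {size : Int} {s t : List Char}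
    (hr : ∀ s v, d.get? s = some v → 1 ≤ v ∧ v < size ∧ s ≠ [])
    (hinj : ∀ s t vs vt, d.get? s = some vs → d.get? t = some vt → vs = vt → s = t)
    (hs : s = [] ∨ (d.get? s).isSome) (ht : t = [] ∨ (d.get? t).isSome)
    (h : idOf d s = idOf d t) : s = t := by
  unfold idOf at h
  by_cases hse : s = [] <;> by_cases hte : t = []
  · exact hse.trans hte.symm
  · exfalso
    obtain hts | hts := ht
    · exact hte hts
    · obtain ⟨v, hv⟩ := Option.isSome_iff_exists.mp hts
      have := hr t v hv
      rw [if_pos hse, if_neg hte, PySem.Dict.getD_eq_get?_getD, hv] at h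
      simp at h; omega
  · exfalso
    obtain hss | hss := hs
    · exact hse hss
    · obtain ⟨v, hv⟩ := Option.isSome_iff_exists.mp hss
      have := hr s v hv
      rw [if_neg hse, if_pos hte, PySem.Dict.getD_eq_get?_getD, hv] at h
      simp at h; omega
  · obtain hss | hss := hs
    · exact absurd hss hse
    obtain hts | hts := ht
    · exact absurd hts hte
    obtain ⟨vs, hvs⟩ := Option.isSome_iff_exists.mp hss
    obtain ⟨vt, hvt⟩ := Option.isSome_iff_exists.mp hts
    rw [if_neg hse, if_neg hte, PySem.Dict.getD_eq_get?_getD, PySem.Dict.getD_eq_get?_getD,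
      hvs, hvt] at h
    simp at h
    exact hinj s t vs vt hvs hvt h

lemma step_rel (a : PySem.Dict (List Char) Int × List Char × List (Int × Int × String) × Int)
    (b : PySem.Dict (Int × Char) Int × Int × Int × List (Int × Int × String) × Int)
    (c : Char) (h : lzRel a b) : lzRel (lzA_step a c) (lzB_step b c) := by
  obtain ⟨d, cs, out, size⟩ := a
  obtain ⟨ch, cur, depth, out2, nid⟩ := b
  obtain ⟨⟨hnid, hsize, hdepth, hcur, hmem, hrange, hinj, hpfx, hchr, hmain⟩, hout⟩ := h
  simp only at hnid hsize hdepth hcur hmem hrange hinj hpfx hchr hmain hout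
  subst hdepth hcur hout
  subst nid
  simp only [lzRel] at *
  have hlook : ch.get? (idOf d cs, c) = d.get? (cs ++ [c]) := hmain cs c hmem
  have hlen1 : ((cs ++ [c]).length : Int) = (cs.length : Int) + 1 := by simp
  cases hget : d.get? (cs ++ [c]) with
  | some j =>
    -- phrase already known: A extends current_string, B follows the child pointer
    have hcont : d.contains (cs ++ [c]) = true := by
      rw [PySem.Dict.contains_eq_isSome_get?, hget]; rfl
    simp only [lzA_step, lzB_step, hlook, hget, hcont, if_pos]
    refine ⟨⟨by trivial, hsize, by omega, ?_, Or.inr (by simp [hget]), hrange, hinj, hpfx,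
      hchr, hmain⟩, by trivial⟩
    unfold idOf
    rw [if_neg (by simp), PySem.Dict.getD_eq_get?_getD, hget]
    rfl
  | none =>
    -- new phrase: A inserts the string, B inserts the trie edge; both emit the same token
    have hcont : d.contains (cs ++ [c]) = false := by
      rw [PySem.Dict.contains_eq_isSome_get?, hget]; rfl
    have hne_nil : cs ++ [c] ≠ [] := by simp
    have hcs_ne : cs ≠ cs ++ [c] := by
      intro hx; have := congrArg List.length hx; simp at this
    have hidcs := idOf_lt hsize hrange cs
    have hidcs_lt : idOf d cs < size := hidcs.2 hmem
    simp only [lzA_step, lzB_step, hlook, hget, hcont, Bool.false_eq_true, if_false]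
    constructor
    · refine ⟨by trivial, by omega, by simp, by simp [idOf], Or.inl rfl, ?_, ?_, ?_, ?_, ?_⟩
      · -- range
        intro s v hv
        rw [PySem.Dict.get?_insert] at hv
        split_ifs at hv with hs
        · obtain rfl : v = size := by injection hv with h2; omega
          exact ⟨hsize, by omega, hs ▸ hne_nil⟩
        · have := hrange s v hv; exact ⟨this.1, by omega, this.2.2⟩
      · -- injectivity
        intro s t vs vt hvs hvt hvv
        rw [PySem.Dict.get?_insert] at hvs hvt
        split_ifs at hvs hvt with hs ht ht
        · exact hs.trans ht.symm
        · exfalso; injection hvs with h2; subst h2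
          have := hrange t vt hvt; omega
        · exfalso; injection hvt with h2; subst h2
          have := hrange s vs hvs; omega
        · exact hinj s t vs vt hvs hvt hvv
      · -- one-step prefix closure
        intro s c2 hsome
        rw [PySem.Dict.get?_insert] at hsome
        split_ifs at hsome with hs
        · obtain ⟨rfl, rfl⟩ := concat_inj_chars hs
          obtain hm | hm := hmem
          · exact Or.inl hm
          · right; rw [PySem.Dict.get?_insert, if_neg hcs_ne]; exact hm
        · obtain hm | hm := hpfx s c2 hsome
          · exact Or.inl hm
          · right
            rw [PySem.Dict.get?_insert]
            split_ifs with hx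
            · rfl
            · exact hm
      · -- range of first components of trie keys
        intro p c2 v hv
        rw [PySem.Dict.get?_insert] at hv
        split_ifs at hv with hk
        · injection hk with h1 h2
          subst h1
          exact ⟨hidcs.1, by omega⟩
        · have := hchr p c2 v hv; omega
      · -- main bisimulation clause
        intro s c2 hs
        by_cases hscs : s = cs ++ [c]
        · subst hscs
          have hid : idOf (d.insert (cs ++ [c]) size) (cs ++ [c]) = size := by
            unfold idOf
            rw [if_neg hne_nil, PySem.Dict.getD_eq_get?_getD, PySem.Dict.get?_insert_self]
            rfl
          rw [hid, PySem.Dict.get?_insert, PySem.Dict.get?_insert]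
          rw [if_neg (by intro hx; injection hx with h1 h2; omega)]
          rw [if_neg (by intro hx; have := congrArg List.length hx; simp at this)]
          cases hv : d.get? (cs ++ [c, c2]) with
          | some v =>
            exfalso
            obtain hm | hm := hpfx (cs ++ [c]) c2 (by rw [List.append_assoc]; simp [hv])
            · exact hne_nil hm
            · rw [hget] at hm; simp at hm
          | none =>
            rw [List.append_assoc, List.singleton_append, hv]
            cases hw : ch.get? (size, c2) with
            | some w => exfalso; have := hchr size c2 w hw; omega
            | none => rfl
        · have hsold : s = [] ∨ (d.get? s).isSome := by
            obtain hm | hm := hs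
            · exact Or.inl hm
            · right; rwa [PySem.Dict.get?_insert, if_neg hscs] at hm
          have hid : idOf (d.insert (cs ++ [c]) size) s = idOf d s := by
            unfold idOf
            by_cases hse : s = []
            · simp [hse]
            · rw [if_neg hse, if_neg hse, PySem.Dict.getD_insert, if_neg hscs]
          rw [hid, PySem.Dict.get?_insert, PySem.Dict.get?_insert]
          by_cases heq : s ++ [c2] = cs ++ [c]
          · obtain ⟨rfl, rfl⟩ := concat_inj_chars heq
            rw [if_pos rfl, if_pos rfl]
          · rw [if_neg heq, if_neg ?_, hmain s c2 hsold]
            intro hx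
            injection hx with h1 h2
            exact heq (by rw [idOf_inj hrange hinj hsold hmem h1, h2])
    · -- outputs: both append the same token
      congr 1
      by_cases hcse : cs = []
      · subst hcse
        simp [idOf]
      · have hcl : cs.length ≠ 0 := fun h0 => hcse (List.eq_nil_of_length_eq_zero h0)
        have hlen : (cs ++ [c]).length ≠ 1 := by simp; omega
        rw [if_neg hlen]
        have hdl : (cs ++ [c]).dropLast = cs := List.dropLast_concat ..
        rw [hdl, PySem.Dict.getD_insert, if_neg hcs_ne]
        have h2 : ((cs ++ [c]).length : Int) - 1 = (cs.length : Int) := by simp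
        rw [h2]
        simp [idOf, hcse]

lemma foldl_rel (l : List Char)
    (a : PySem.Dict (List Char) Int × List Char × List (Int × Int × String) × Int)
    (b : PySem.Dict (Int × Char) Int × Int × Int × List (Int × Int × String) × Int)
    (h : lzRel a b) : lzRel (l.foldl lzA_step a) (l.foldl lzB_step b) := by
  induction l generalizing a b with
  | nil => exact h
  | cons c l ih => exact ih _ _ (step_rel a b c h)

lemma init_rel : lzRel (PySem.Dict.empty, [], [], 1) (PySem.Dict.empty, 0, 0, [], 1) := by
  refine ⟨⟨rfl, le_refl 1, rfl, rfl, Or.inl rfl, ?_, ?_, ?_, ?_, ?_⟩, rfl⟩ <;>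
    intro s <;> simp [PySem.Dict.get?_empty, idOf]

-- ===== VERDICT (by name: the statement is the Claim_ definition above) =====
theorem lz_encode_spec : Claim_equal_lz_encode := by
  intro data _
  unfold Spec_lz_encode lz_encode lz_encode_alt
  exact (foldl_rel data.toList _ _ init_rel).2
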